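-- pv_equiv track=rewrite | github.com/frenzycoder7/linkedIn-X-automated-post | app/fetch_x.py | trim_keywords_for_limit
-- ===== SOURCE A (Python) =====
-- from typing import List, Dict, Tuple
--
-- MAX_QUERY_LEN = 256
--
-- MIN_KEYWORDS = 3
--
-- def build_search_query(keywords: List[str]) -> str:
--     # Combine with OR, restrict to English, exclude retweets
--     ors = " OR ".join(f"\"{k}\"" if " " in k else k for k in keywords)
--     return f"({ors}) lang:en -is:retweet"
--
-- def trim_keywords_for_limit(keywords: List[str]) -> List[str]:
--     if not keywords:
--         return keywords
--     low = 1
--     high = len(keywords)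
--     best = 1
--     while low <= high:
--         mid = (low + high) // 2
--         q = build_search_query(keywords[:mid])
--         if len(q) <= MAX_QUERY_LEN:
--             best = mid
--             low = mid + 1
--         else:
--             high = mid - 1
--     best = max(best, MIN_KEYWORDS)
--     return keywords[:best]
-- ===== SOURCE B (Python) =====
-- def trim_keywords_for_limit(keywords):
--     # One linear pass over incremental prefix query lengths instead of
--     # rebuilding the query inside a binary search.
--     if not keywords:
--         return keywords
--     best = 1
--     running = 18  # len('() lang:en -is:retweet') - 4 for the first missing ' OR '
--     for i, k in enumerate(keywords):
--         running += len(k) + (2 if " " in k else 0) + 4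
--         if running <= 256:
--             best = i + 1
--         else:
--             break
--     return keywords[:max(best, 3)]
-- ===== Notes on version B (the rewrite author's own statement) =====
-- stated objective: faster
-- what changed: Replaced the binary search that rebuilds the whole search query string at every probe with a single linear pass that maintains the running query length incrementally and stops at the first keyword that overflows the limit.
import Mathlib
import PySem

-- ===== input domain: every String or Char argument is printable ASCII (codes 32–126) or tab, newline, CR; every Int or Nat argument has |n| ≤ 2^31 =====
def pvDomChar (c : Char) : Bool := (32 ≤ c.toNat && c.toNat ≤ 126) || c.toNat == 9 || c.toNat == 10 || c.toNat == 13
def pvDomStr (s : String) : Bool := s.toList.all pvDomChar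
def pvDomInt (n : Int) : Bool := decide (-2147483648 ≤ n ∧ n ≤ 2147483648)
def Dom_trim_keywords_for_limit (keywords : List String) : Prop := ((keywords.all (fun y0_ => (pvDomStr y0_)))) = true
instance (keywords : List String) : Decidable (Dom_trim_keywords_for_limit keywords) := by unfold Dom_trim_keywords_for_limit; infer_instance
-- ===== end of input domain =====

-- B replaces A's binary search (which rebuilds the full query string at every probe)
-- with one linear pass maintaining the running query length incrementally (objective: faster).


-- ===== PORT A =====
-- f'"{k}"' if " " in k else k   (strings handled on the List Char side, per the PySem convention)
def pvQuoteTerm (k : String) : List Char :=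
  if PySem.Chars.isIn [' '] k.toList then '"' :: (k.toList ++ ['"']) else k.toList

-- build_search_query: '(' + ' OR '.join(terms) + ') lang:en -is:retweet'
def build_search_query (keywords : List String) : List Char :=
  let ors := PySem.Chars.join " OR ".toList (keywords.map pvQuoteTerm)
  '(' :: (ors ++ ") lang:en -is:retweet".toList)

-- the 'while low <= high' binary-search loop of A
def pvTrimLoopA (keywords : List String) (low high best : Int) : Int :=
  if h : low ≤ high then
    let mid := PySem.Int.floordiv (low + high) 2
    let q := build_search_query (PySem.List.slice keywords none (some mid))
    if (PySem.Chars.len q : Int) ≤ 256 then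
      pvTrimLoopA keywords (mid + 1) high mid
    else
      pvTrimLoopA keywords low (mid - 1) best
  else best
termination_by (high + 1 - low).toNat
decreasing_by
  · have := PySem.Int.floordiv_two_mid_bounds (lo := low) (hi := high) h
    omega
  · have := PySem.Int.floordiv_two_mid_bounds (lo := low) (hi := high) h
    omega

def trim_keywords_for_limit (keywords : List String) : List String :=
  if keywords = [] then keywords
  else
    let best := pvTrimLoopA keywords 1 (keywords.length : Int) 1
    let best := max best 3
    PySem.List.slice keywords none (some best)

-- ===== PORT B =====
-- the 'for i, k in enumerate(keywords)' pass of Source B: running query length, break on overflow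
def pvTrimLoopB (rest : List String) (running best : Int) (i : Nat) : Int :=
  match rest with
  | [] => best
  | k :: rest' =>
    let running := running + (k.toList.length : Int) +
      (if PySem.Chars.isIn [' '] k.toList then 2 else 0) + 4
    if running ≤ 256 then pvTrimLoopB rest' running ((i : Int) + 1) (i + 1)
    else best

def trim_keywords_for_limit_alt (keywords : List String) : List String :=
  if keywords = [] then keywords
  else
    let best := pvTrimLoopB keywords 18 1 0
    PySem.List.slice keywords none (some (max best 3))

-- ===== PRECONDITION & SPEC =====
def Spec_trim_keywords_for_limit (keywords : List String) (out : List String) : Prop := out = trim_keywords_for_limit_alt keywords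
instance (keywords : List String) (out : List String) : Decidable (Spec_trim_keywords_for_limit keywords out) := by unfold Spec_trim_keywords_for_limit; infer_instance

-- ===== CLAIM (what is proved, stated in full; the proofs are below) =====
def Claim_equal_trim_keywords_for_limit : Prop := ∀ (keywords : List String), Dom_trim_keywords_for_limit keywords → Spec_trim_keywords_for_limit keywords (trim_keywords_for_limit keywords)

-- ===== LEMMAS AND PROOFS =====

-- length contributed by one keyword inside the query (name plus quotes if it has a space)
def pvTLen (k : String) : Int :=
  (k.toList.length : Int) + (if PySem.Chars.isIn [' '] k.toList then 2 else 0)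

-- query length for the first m keywords (the quantity B's running variable tracks)
def pvCost (ks : List String) (m : Nat) : Int :=
  18 + ((ks.take m).map (fun k => pvTLen k + 4)).sum

-- 'the query over m keywords fits'
def pvGood (ks : List String) (m : Int) : Prop := pvCost ks m.toNat ≤ 256

-- what both loops return: the largest m in [1, n] whose query fits, else 1
def pvAns (ks : List String) (r : Int) : Prop :=
  1 ≤ r ∧ r ≤ (ks.length : Int) ∧ (pvGood ks r ∨ r = 1) ∧
    ∀ m : Int, r < m → m ≤ (ks.length : Int) → ¬ pvGood ks m

theorem pvAns_unique {ks : List String} {r1 r2 : Int}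
    (h1 : pvAns ks r1) (h2 : pvAns ks r2) : r1 = r2 := by
  obtain ⟨ha1, hb1, hc1, hd1⟩ := h1
  obtain ⟨ha2, hb2, hc2, hd2⟩ := h2
  by_contra hne
  rcases lt_or_gt_of_ne hne with h | h
  · have := hd1 r2 h hb2
    rcases hc2 with hg | he
    · exact this hg
    · omega
  · have := hd2 r1 h hb1
    rcases hc1 with hg | he
    · exact this hg
    · omega

theorem pvTLen_quote (k : String) : ((pvQuoteTerm k).length : Int) = pvTLen k := by
  unfold pvQuoteTerm pvTLen
  split
  · simp
    omega
  · simp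

theorem pvJoin_len (ts : List (List Char)) (hts : ts ≠ []) :
    ((PySem.Chars.join " OR ".toList ts).length : Int)
      = (ts.map (fun t => (t.length : Int) + 4)).sum - 4 := by
  induction ts with
  | nil => simp at hts
  | cons t rest ih =>
    cases rest with
    | nil => simp [PySem.Chars.join_singleton]
    | cons u rest' =>
      rw [PySem.Chars.join_cons_cons]
      have := ih (by simp)
      simp only [List.length_append, List.map_cons, List.sum_cons] at this ⊢
      have hsep : (" OR ".toList.length) = 4 := by decide
      rw [hsep]
      push_cast at this ⊢
      omega

theorem pvBuild_len (ks : List String) (hks : ks ≠ []) :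
    ((build_search_query ks).length : Int)
      = 18 + (ks.map (fun k => pvTLen k + 4)).sum := by
  have h1 := pvJoin_len (ks.map pvQuoteTerm) (by simpa using hks)
  have h2 : ((ks.map pvQuoteTerm).map (fun t => ((t.length : Int) + 4)))
      = ks.map (fun k => pvTLen k + 4) := by
    rw [List.map_map]
    apply List.map_congr_left
    intro k _
    simp only [Function.comp_apply]
    rw [pvTLen_quote]
  rw [h2] at h1
  unfold build_search_query
  simp only [List.length_cons, List.length_append]
  have hsfx : (") lang:en -is:retweet".toList.length) = 21 := by decide
  rw [hsfx]
  push_cast at h1 ⊢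
  omega

-- the probe A evaluates at keywords[:m] equals pvCost, for 1 ≤ m
theorem pvProbe_eq (ks : List String) (m : Int) (h0 : 1 ≤ m) (hks : ks ≠ []) :
    ((build_search_query (PySem.List.slice ks none (some m))).length : Int)
      = pvCost ks m.toNat := by
  rw [PySem.List.slice_to ks (show (0:Int) ≤ m by omega)]
  rw [pvBuild_len]
  · rfl
  · simp only [ne_eq, List.take_eq_nil_iff, not_or]
    constructor
    · omega
    · exact hks

theorem pvTLen_add_four_nonneg (k : String) : 0 ≤ pvTLen k + 4 := by
  unfold pvTLen
  split <;> positivity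

theorem pvCost_mono (ks : List String) {a b : Nat} (hab : a ≤ b) :
    pvCost ks a ≤ pvCost ks b := by
  unfold pvCost
  have hsplit : ks.take b = ks.take a ++ (ks.drop a).take (b - a) := by
    rw [← List.take_add]; congr 1; omega
  rw [hsplit, List.map_append, List.sum_append]
  have : 0 ≤ (((ks.drop a).take (b - a)).map (fun k => pvTLen k + 4)).sum :=
    List.sum_nonneg (by
      intro x hx
      simp only [List.mem_map] at hx
      obtain ⟨k, _, rfl⟩ := hx
      exact pvTLen_add_four_nonneg k)
  omega

theorem pvCost_succ (ks : List String) (i : Nat) (k : String) (r : List String)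
    (h : ks.drop i = k :: r) :
    pvCost ks (i + 1) = pvCost ks i + (pvTLen k + 4) := by
  unfold pvCost
  have htake : ks.take (i + 1) = ks.take i ++ [k] := by
    rw [List.take_add_one]
    have h2 : (ks.drop i)[0]? = ks[i + 0]? := List.getElem?_drop
    rw [h] at h2; simp at h2
    simp [h2.symm]
  rw [htake, List.map_append, List.sum_append]
  simp
  ring

-- one unrolling of A's loop, both branches
theorem pvTrimLoopA_step_le (ks : List String) (low high best : Int) (h : low ≤ high)
    (hq : ((build_search_query (PySem.List.slice ks none
        (some (PySem.Int.floordiv (low + high) 2)))).length : Int) ≤ 256) :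
    pvTrimLoopA ks low high best
      = pvTrimLoopA ks (PySem.Int.floordiv (low + high) 2 + 1) high
          (PySem.Int.floordiv (low + high) 2) := by
  rw [pvTrimLoopA]
  simp only [dif_pos h, PySem.Chars.len_eq]
  rw [if_pos hq]

theorem pvTrimLoopA_step_gt (ks : List String) (low high best : Int) (h : low ≤ high)
    (hq : ¬ ((build_search_query (PySem.List.slice ks none
        (some (PySem.Int.floordiv (low + high) 2)))).length : Int) ≤ 256) :
    pvTrimLoopA ks low high best
      = pvTrimLoopA ks low (PySem.Int.floordiv (low + high) 2 - 1) best := by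
  rw [pvTrimLoopA]
  simp only [dif_pos h, PySem.Chars.len_eq]
  rw [if_neg hq]

-- A's binary-search loop lands on pvAns
theorem pvTrimLoopA_ans (ks : List String) (hks : ks ≠ []) (low high best : Int)
    (hlow : 1 ≤ low) (hhigh : high ≤ (ks.length : Int))
    (hbest : (best = 1 ∧ low = 1) ∨
        (1 ≤ best ∧ best ≤ (ks.length : Int) ∧ pvGood ks best ∧ low = best + 1))
    (hhigh2 : ∀ m : Int, high < m → m ≤ (ks.length : Int) → ¬ pvGood ks m) :
    pvAns ks (pvTrimLoopA ks low high best) := by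
  by_cases h : low ≤ high
  · have hmid := PySem.Int.floordiv_two_mid_bounds (lo := low) (hi := high) h
    set mid := PySem.Int.floordiv (low + high) 2 with hmiddef
    have hp := pvProbe_eq ks mid (by omega) hks
    by_cases hq : ((build_search_query (PySem.List.slice ks none (some mid))).length : Int) ≤ 256
    · rw [pvTrimLoopA_step_le ks low high best h hq]
      apply pvTrimLoopA_ans ks hks (mid + 1) high mid (by omega) hhigh
      · right
        exact ⟨by omega, by omega, by unfold pvGood; omega, rfl⟩
      · exact hhigh2
    · rw [pvTrimLoopA_step_gt ks low high best h hq]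
      apply pvTrimLoopA_ans ks hks low (mid - 1) best hlow (by omega) hbest
      intro m hm hmn
      unfold pvGood
      have hmono : pvCost ks mid.toNat ≤ pvCost ks m.toNat :=
        pvCost_mono ks (by omega)
      omega
  · rw [pvTrimLoopA]
    rw [dif_neg h]
    rcases hbest with ⟨hb1, hl1⟩ | ⟨hb1, hb2, hb3, hl⟩
    · refine ⟨by omega, ?_, Or.inr hb1, ?_⟩
      · subst hb1
        have : 0 < ks.length := List.length_pos_of_ne_nil hks
        omega
      · intro m hm hmn
        exact hhigh2 m (by omega) hmn
    · refine ⟨hb1, hb2, Or.inl hb3, ?_⟩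
      intro m hm hmn
      exact hhigh2 m (by omega) hmn
termination_by (high + 1 - low).toNat
decreasing_by
  · omega
  · omega

-- B's linear pass lands on pvAns
theorem pvTrimLoopB_ans (ks : List String) (hks : ks ≠ []) :
    ∀ (rest : List String) (i : Nat), rest = ks.drop i → i ≤ ks.length →
      (∀ m : Int, 1 ≤ m → m ≤ (i : Int) → pvGood ks m) →
      pvAns ks (pvTrimLoopB rest (pvCost ks i) (max (i : Int) 1) i) := by
  have hn : 0 < ks.length := List.length_pos_of_ne_nil hks
  intro rest
  induction rest with
  | nil =>
    intro i hdrop hi hgood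
    have hin : i = ks.length := by
      have := List.drop_eq_nil_iff.mp hdrop.symm
      omega
    subst hin
    rw [pvTrimLoopB]
    refine ⟨by omega, by omega, Or.inl ?_, ?_⟩
    · have := hgood (ks.length : Int) (by omega) (by omega)
      unfold pvGood at this ⊢
      have hmax : (max ((ks.length : Nat) : Int) 1) = ((ks.length : Nat) : Int) := by omega
      rw [hmax]
      simpa using this
    · intro m hm1 hm2
      omega
  | cons k rest' ih =>
    intro i hdrop hi hgood
    have hik : i < ks.length := by
      by_contra hcon
      have hnil : ks.drop i = [] := List.drop_eq_nil_iff.mpr (by omega)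
      rw [hnil] at hdrop
      exact List.cons_ne_nil _ _ hdrop
    have hsucc := pvCost_succ ks i k rest' hdrop.symm
    rw [pvTrimLoopB]
    have hrun : pvCost ks i + (k.toList.length : Int) +
        (if PySem.Chars.isIn [' '] k.toList then 2 else 0) + 4 = pvCost ks (i + 1) := by
      rw [hsucc]
      unfold pvTLen
      ring
    rw [hrun]
    by_cases hle : pvCost ks (i + 1) ≤ 256
    · rw [if_pos hle]
      have hdrop' : rest' = ks.drop (i + 1) := by
        have htl : ks.drop (i + 1) = (ks.drop i).tail := by
          rw [List.tail_drop]
        rw [htl, ← hdrop]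
        rfl
      have hrec := ih (i + 1) hdrop' (by omega) (by
        intro m hm1 hm2
        by_cases hmi : m ≤ (i : Int)
        · exact hgood m hm1 hmi
        · unfold pvGood
          have hm : m.toNat = i + 1 := by omega
          rw [hm]
          exact hle)
      have hmax : (max ((i + 1 : Nat) : Int) 1) = ((i : Nat) : Int) + 1 := by
        push_cast
        omega
      rw [hmax] at hrec
      exact hrec
    · rw [if_neg hle]
      refine ⟨by omega, by omega, ?_, ?_⟩
      · by_cases hi0 : i = 0
        · right; omega
        · left
          have := hgood (i : Int) (by omega) (by omega)
          have hmax : (max ((i : Nat) : Int) 1) = ((i : Nat) : Int) := by omega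
          rw [hmax]
          exact this
      · intro m hm1 hm2
        unfold pvGood
        have hmge : i + 1 ≤ m.toNat := by omega
        have hmono : pvCost ks (i + 1) ≤ pvCost ks m.toNat := pvCost_mono ks hmge
        omega

-- ===== VERDICT (by name: the statement is the Claim_ definition above) =====
theorem trim_keywords_for_limit_spec : Claim_equal_trim_keywords_for_limit := by
  intro ks _
  unfold Spec_trim_keywords_for_limit trim_keywords_for_limit trim_keywords_for_limit_alt
  by_cases hks : ks = []
  · simp [hks]
  · simp only [hks, if_false]
    have hA : pvAns ks (pvTrimLoopA ks 1 (ks.length : Int) 1) := by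
      apply pvTrimLoopA_ans ks hks 1 (ks.length : Int) 1 (by omega) (by omega)
      · left; exact ⟨rfl, rfl⟩
      · intro m hm1 hm2; omega
    have hB : pvAns ks (pvTrimLoopB ks 18 1 0) := by
      have h18 : (18 : Int) = pvCost ks 0 := by simp [pvCost]
      have h1 : (1 : Int) = max ((0 : Nat) : Int) 1 := by simp
      rw [h18, h1]
      apply pvTrimLoopB_ans ks hks ks 0 (by simp) (by omega)
      intro m hm1 hm2; omega
    rw [pvAns_unique hA hB]
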